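-- pv_equiv track=rewrite | github.com/ContextLab/CDL-bibliography | bibcheck/helpers.py | strip_leading_trailing_non_letters
-- ===== SOURCE A (Python) =====
-- from string import ascii_lowercase
--
-- def strip_leading_trailing_non_letters(s):
--     """Strip leading and trailing non-alphabetic characters from a string.
--     Returns (prefix, core, suffix) where core contains only letters and internal punctuation."""
--     if len(s) == 0:
--         return "", "", ""
--
--     # Find first letter
--     first_letter = -1
--     for i, c in enumerate(s):
--         if c.lower() in ascii_lowercase:
--             first_letter = i
--             break
--
--     if first_letter == -1:  # No letters found
--         return s, "", ""
--
--     # Find last letter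
--     last_letter = -1
--     for i in range(len(s) - 1, -1, -1):
--         if s[i].lower() in ascii_lowercase:
--             last_letter = i
--             break
--
--     prefix = s[:first_letter]
--     core = s[first_letter : last_letter + 1]
--     suffix = s[last_letter + 1 :]
--
--     return prefix, core, suffix
-- ===== SOURCE B (Python) =====
-- from string import ascii_lowercase
--
-- def strip_leading_trailing_non_letters(s):
--     """Single forward pass tracking first and last letter positions."""
--     first = last = -1
--     for i, c in enumerate(s):
--         if c.lower() in ascii_lowercase:
--             if first == -1:
--                 first = i
--             last = i
--     if first == -1:
--         return s, "", ""
--     return s[:first], s[first : last + 1], s[last + 1 :]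
-- ===== Notes on version B (the rewrite author's own statement) =====
-- stated objective: alternative
-- what changed: Replaces the two directional scans (forward for the first letter, backward over range(len-1,-1,-1) for the last) with a single forward enumerate pass maintaining both first and last letter indices, and merges the empty/no-letter branches into one.
import Mathlib
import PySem

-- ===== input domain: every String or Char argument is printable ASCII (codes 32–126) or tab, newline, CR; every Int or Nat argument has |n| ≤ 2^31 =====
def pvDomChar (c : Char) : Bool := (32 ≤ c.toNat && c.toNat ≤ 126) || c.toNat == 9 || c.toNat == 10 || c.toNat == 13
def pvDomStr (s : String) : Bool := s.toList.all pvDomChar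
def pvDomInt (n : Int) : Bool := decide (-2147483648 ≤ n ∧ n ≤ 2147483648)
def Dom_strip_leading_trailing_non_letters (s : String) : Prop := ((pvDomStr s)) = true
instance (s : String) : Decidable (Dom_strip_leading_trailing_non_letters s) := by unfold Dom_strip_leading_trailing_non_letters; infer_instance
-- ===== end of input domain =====

-- B replaces A's two directional scans with one forward enumerate pass tracking both the
-- first and the last letter index (objective: alternative decomposition, same cost).

-- ===== PORT A =====
-- the test `c.lower() in ascii_lowercase`, shared verbatim by both Pythons
def pvLetter (c : Char) : Bool :=
  PySem.Chars.isIn [PySem.Chars.lowerChar c] "abcdefghijklmnopqrstuvwxyz".toList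

-- A's first loop: `for i, c in enumerate(s): if letter: first_letter = i; break`
def pvAFirst : List Char → Int → Int
  | [], _ => -1
  | c :: rest, i => if pvLetter c then i else pvAFirst rest (i + 1)

-- A's second loop: `for i in range(len(s)-1, -1, -1): if letter(s[i]): last_letter = i; break`
def pvALast (cs : List Char) : List Int → Int
  | [] => -1
  | i :: rest => if pvLetter (PySem.List.pyGetD cs i ' ') then i else pvALast cs rest

def strip_leading_trailing_non_letters (s : String) : String × String × String :=
  let cs := s.toList
  if cs.length = 0 then ("", "", "")
  else
    let first := pvAFirst cs 0
    if first = -1 then (s, "", "")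
    else
      let last := pvALast cs (PySem.List.pyRange ((cs.length : Int) - 1) (-1) (-1))
      (String.ofList (PySem.List.slice cs none (some first)),
       String.ofList (PySem.List.slice cs (some first) (some (last + 1))),
       String.ofList (PySem.List.slice cs (some (last + 1)) none))

-- ===== PORT B =====
-- B's loop body: update (first, last) on each enumerated character
def pvBStep (st : Int × Int) (p : Int × Char) : Int × Int :=
  if pvLetter p.2 then ((if st.1 = -1 then p.1 else st.1), p.1) else st

def strip_leading_trailing_non_letters_alt (s : String) : String × String × String :=
  let cs := s.toList
  let fl := (PySem.List.enumerate cs 0).foldl pvBStep (-1, -1)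
  if fl.1 = -1 then (s, "", "")
  else
    (String.ofList (PySem.List.slice cs none (some fl.1)),
     String.ofList (PySem.List.slice cs (some fl.1) (some (fl.2 + 1))),
     String.ofList (PySem.List.slice cs (some (fl.2 + 1)) none))

-- ===== PRECONDITION & SPEC =====
def Spec_strip_leading_trailing_non_letters (s : String) (out : String × String × String) : Prop := out = strip_leading_trailing_non_letters_alt s
instance (s : String) (out : String × String × String) : Decidable (Spec_strip_leading_trailing_non_letters s out) := by unfold Spec_strip_leading_trailing_non_letters; infer_instance

-- ===== CLAIM (what is proved, stated in full; the proofs are below) =====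
def Claim_equal_strip_leading_trailing_non_letters : Prop := ∀ (s : String), Dom_strip_leading_trailing_non_letters s → Spec_strip_leading_trailing_non_letters s (strip_leading_trailing_non_letters s)

-- ===== LEMMAS AND PROOFS =====

-- forward-recursive reference for "index of the last letter" (-1 if none)
def pvLastIdx : List Char → Int → Int
  | [], _ => -1
  | c :: rest, i =>
      let r := pvLastIdx rest (i + 1)
      if r ≠ -1 then r else if pvLetter c then i else -1

-- descending reference matching A's backward scan
def pvLastFrom (cs : List Char) : Nat → Int
  | 0 => if pvLetter (cs.getD 0 ' ') then 0 else -1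
  | a + 1 => if pvLetter (cs.getD (a + 1) ' ') then ((a : Int) + 1) else pvLastFrom cs a

theorem pvFold_fst_stable (cs : List Char) : ∀ (i f l : Int), f ≠ -1 →
    ((PySem.List.enumerate cs i).foldl pvBStep (f, l)).1 = f := by
  induction cs with
  | nil => intro i f l h; simp [PySem.List.enumerate_nil]
  | cons c rest ih =>
    intro i f l h
    simp only [PySem.List.enumerate_cons, List.foldl_cons]
    by_cases hc : pvLetter c
    · simp [pvBStep, hc, if_neg h, ih (i + 1) f i h]
    · simp [pvBStep, hc, ih (i + 1) f l h]

theorem pvFold_fst (cs : List Char) : ∀ (i l : Int), 0 ≤ i →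
    ((PySem.List.enumerate cs i).foldl pvBStep (-1, l)).1 = pvAFirst cs i := by
  induction cs with
  | nil => intro i l _; simp [PySem.List.enumerate_nil, pvAFirst]
  | cons c rest ih =>
    intro i l hi
    simp only [PySem.List.enumerate_cons, List.foldl_cons, pvAFirst]
    by_cases hc : pvLetter c
    · have hne : i ≠ -1 := by omega
      simp [pvBStep, hc, pvFold_fst_stable rest (i + 1) i i hne]
    · simp [pvBStep, hc, ih (i + 1) l (by omega)]

theorem pvFold_snd (cs : List Char) : ∀ (i f l : Int), 0 ≤ i →
    ((PySem.List.enumerate cs i).foldl pvBStep (f, l)).2 =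
      if pvLastIdx cs i = -1 then l else pvLastIdx cs i := by
  induction cs with
  | nil => intro i f l _; simp [PySem.List.enumerate_nil, pvLastIdx]
  | cons c rest ih =>
    intro i f l hi
    simp only [PySem.List.enumerate_cons, List.foldl_cons, pvLastIdx]
    by_cases hc : pvLetter c
    · rw [show pvBStep (f, l) (i, c) = ((if f = -1 then i else f), i) by simp [pvBStep, hc]]
      rw [ih (i + 1) _ i (by omega)]
      by_cases hr : pvLastIdx rest (i + 1) = -1
      · simp [hr, hc]; omega
      · simp [hr]
    · rw [show pvBStep (f, l) (i, c) = (f, l) by simp [pvBStep, hc]]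
      rw [ih (i + 1) f l (by omega)]
      by_cases hr : pvLastIdx rest (i + 1) = -1
      · simp [hr, hc]
      · simp [hr]

theorem pvALast_eq_lastFrom (cs : List Char) : ∀ (a : Nat), a < cs.length →
    pvALast cs (PySem.List.pyRange (a : Int) (-1) (-1)) = pvLastFrom cs a := by
  intro a
  induction a with
  | zero =>
    intro h
    simp only [Nat.cast_zero]
    rw [PySem.List.pyRange_neg_one_cons (by omega)]
    rw [show ((0 : Int) - 1) = -1 by ring, PySem.List.pyRange_neg_one_eq_nil (by omega)]
    simp [pvALast, pvLastFrom, PySem.List.pyGetD_zero, List.getD_eq_getElem?_getD]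
  | succ a ih =>
    intro h
    rw [show ((a + 1 : Nat) : Int) = ((a : Int) + 1) by push_cast; ring]
    rw [PySem.List.pyRange_neg_one_cons (by omega)]
    rw [show ((a : Int) + 1 - 1) = (a : Int) by ring]
    simp only [pvALast, pvLastFrom]
    rw [show ((a : Int) + 1) = ((a + 1 : Nat) : Int) by push_cast; ring]
    rw [PySem.List.pyGetD_natCast]
    rw [ih (by omega)]

theorem pvGetD_append_left (ds : List Char) (c x : Char) (a : Nat) (h : a < ds.length) :
    (ds ++ [c]).getD a x = ds.getD a x := by
  rw [List.getD_eq_getElem?_getD, List.getD_eq_getElem?_getD, List.getElem?_append_left h]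

theorem pvLastFrom_append (ds : List Char) (c : Char) : ∀ (a : Nat), a < ds.length →
    pvLastFrom (ds ++ [c]) a = pvLastFrom ds a := by
  intro a
  induction a with
  | zero =>
    intro h
    simp only [pvLastFrom, pvGetD_append_left ds c ' ' 0 h]
  | succ a ih =>
    intro h
    simp only [pvLastFrom, pvGetD_append_left ds c ' ' (a + 1) h]
    rw [ih (by omega)]

theorem pvLastIdx_append (c : Char) : ∀ (ds : List Char) (i : Int), 0 ≤ i →
    pvLastIdx (ds ++ [c]) i = if pvLetter c then i + ds.length else pvLastIdx ds i := by
  intro ds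
  induction ds with
  | nil => intro i hi; simp [pvLastIdx]
  | cons d ds ih =>
    intro i hi
    simp only [List.cons_append, pvLastIdx]
    rw [ih (i + 1) (by omega)]
    by_cases hc : pvLetter c
    · have : i + 1 + (ds.length : Int) ≠ -1 := by omega
      simp [hc, this]
      omega
    · simp [hc]

theorem pvLastFrom_eq_lastIdx (cs : List Char) (h : cs ≠ []) :
    pvLastFrom cs (cs.length - 1) = pvLastIdx cs 0 := by
  induction cs using List.reverseRecOn with
  | nil => exact absurd rfl h
  | append_singleton ds c ih =>
    rw [pvLastIdx_append c ds 0 (by omega)]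
    rcases List.eq_nil_or_concat' ds with hds | _
    · subst hds
      by_cases hc : pvLetter c <;> simp [pvLastFrom, pvLastIdx, hc]
    · have hne : ds ≠ [] := by rintro rfl; simp_all
      have hlen : (ds ++ [c]).length - 1 = (ds.length - 1) + 1 := by
        have := List.length_pos_iff.mpr hne; simp; omega
      rw [hlen]
      simp only [pvLastFrom]
      have hsub : (ds.length - 1) + 1 = ds.length := by
        have := List.length_pos_iff.mpr hne; omega
      rw [hsub]
      rw [show ((ds ++ [c]).getD ds.length ' ') = c by
        rw [List.getD_eq_getElem?_getD, List.getElem?_append_right (le_refl ds.length)]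
        simp]
      by_cases hc : pvLetter c
      · simp [hc]; omega
      · rw [if_neg hc, if_neg hc, pvLastFrom_append ds c (ds.length - 1)
          (by have := List.length_pos_iff.mpr hne; omega), ih hne]

-- ===== VERDICT (by name: the statement is the Claim_ definition above) =====
theorem strip_leading_trailing_non_letters_spec : Claim_equal_strip_leading_trailing_non_letters := by
  intro s _
  unfold Spec_strip_leading_trailing_non_letters
  unfold strip_leading_trailing_non_letters strip_leading_trailing_non_letters_alt
  by_cases hnil : s.toList = []
  · simp only [hnil]
    have hs : s = "" := by
      simpa using congrArg String.ofList hnil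
    simp [PySem.List.enumerate_nil, hs]
  · have hlen : s.toList.length ≠ 0 := by simpa [List.length_eq_zero_iff] using hnil
    simp only [if_neg hlen]
    rw [show ((PySem.List.enumerate s.toList 0).foldl pvBStep (-1, -1)).1
        = pvAFirst s.toList 0 from pvFold_fst s.toList 0 (-1) (by omega)]
    by_cases hf : pvAFirst s.toList 0 = -1
    · simp [hf]
    · simp only [if_neg hf]
      have hlast : ((PySem.List.enumerate s.toList 0).foldl pvBStep (-1, -1)).2
          = pvALast s.toList (PySem.List.pyRange ((s.toList.length : Int) - 1) (-1) (-1)) := by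
        rw [pvFold_snd s.toList 0 (-1) (-1) (by omega)]
        rw [show ((s.toList.length : Int) - 1) = ((s.toList.length - 1 : Nat) : Int) by
          have : 0 < s.toList.length := Nat.pos_of_ne_zero hlen; omega]
        rw [pvALast_eq_lastFrom s.toList (s.toList.length - 1)
          (by have : 0 < s.toList.length := Nat.pos_of_ne_zero hlen; omega)]
        rw [pvLastFrom_eq_lastIdx s.toList hnil]
        by_cases hr : pvLastIdx s.toList 0 = -1 <;> simp [hr]
      rw [hlast]
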